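-- pv_equiv track=rewrite | github.com/yjspheal/Algorithms | 백준/Silver/1251. 단어 나누기/단어 나누기.py | find_earlist_char_idx
-- ===== SOURCE A (Python) =====
-- def find_earlist_char_idx(sentence, start_idx, end_idx):
--     """
--     sentence[start_idx: end_idx]에서, 가장 사전적으로 먼저 오는 문자의 인덱스를 반환한다.
--
--     Args:
--         sentence (char): 인자로 받을 문자열
--         start_idx (int): sentence에서 인덱스 따질 범위 시작점
--         end_idx (int): sentence에서 인덱스 따질 범위 끝점
--
--     Returns:
--         int: 사전적으로 제일 빠른 문자 인덱스
--     """
--     min_ord = ord(sentence[start_idx])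
--     min_idxs = []
--
--     for i, char in enumerate(sentence):
--         if start_idx <= i < end_idx:  # 범위에 들어와야 계산
--
--             if ord(char) < min_ord:  # 최소값 갱신 시 update
--                 min_ord = ord(char)
--                 min_idxs = [i]
--
--             elif ord(char) == min_ord:  # 똑같다면 추가
--                 min_idxs.append(i)
--
--     return min_idxs
-- ===== SOURCE B (Python) =====
-- def find_earlist_char_idx(sentence, start_idx, end_idx):
--     m = sentence[start_idx]
--     lo = max(start_idx, 0)
--     hi = min(end_idx, len(sentence))
--     for i in range(lo, hi):
--         if sentence[i] < m:
--             m = sentence[i]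
--     return [i for i in range(lo, hi) if sentence[i] == m]
-- ===== Notes on version B (the rewrite author's own statement) =====
-- stated objective: alternative
-- what changed: A scans the whole string once, reactively resetting/extending the index list whenever the running minimum changes; B first computes the minimum character (seeded with sentence[start_idx], A's own initial access) over the window range(max(start_idx,0), min(end_idx,len)) and then collects the matching indices in a second pass (min-then-filter decomposition).
import Mathlib
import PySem

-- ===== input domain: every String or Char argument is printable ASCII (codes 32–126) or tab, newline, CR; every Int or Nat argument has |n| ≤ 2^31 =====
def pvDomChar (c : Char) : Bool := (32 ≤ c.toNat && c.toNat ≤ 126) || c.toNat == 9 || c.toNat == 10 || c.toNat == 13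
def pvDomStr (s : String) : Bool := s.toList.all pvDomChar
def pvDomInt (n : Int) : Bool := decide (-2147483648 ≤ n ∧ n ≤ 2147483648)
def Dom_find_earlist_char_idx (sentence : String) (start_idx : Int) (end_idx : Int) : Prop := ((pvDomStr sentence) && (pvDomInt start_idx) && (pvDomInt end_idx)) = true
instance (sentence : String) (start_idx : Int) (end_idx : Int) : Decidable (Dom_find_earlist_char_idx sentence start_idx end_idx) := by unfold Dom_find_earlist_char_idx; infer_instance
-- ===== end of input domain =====

-- B re-decomposes A's whole-string reactive scan as min-then-filter over just the requested
-- window; return-value equivalence is proved on A's whole returning domain.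

-- ===== PORT A =====
-- step of A's loop: state (min_ord, min_idxs), one enumerate pair (i, char)
def pvStepA (start_idx end_idx : Int) (st : Int × List Int) (p : Int × Char) : Int × List Int :=
  if start_idx ≤ p.1 ∧ p.1 < end_idx then
    if (p.2.toNat : Int) < st.1 then ((p.2.toNat : Int), [p.1])
    else if (p.2.toNat : Int) = st.1 then (st.1, st.2 ++ [p.1])
    else st
  else st

def find_earlist_char_idx (sentence : String) (start_idx : Int) (end_idx : Int) : List Int :=
  match PySem.Str.pyGet? sentence start_idx with
  | none => []   -- sentence[start_idx] raises IndexError: outside Pre_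
  | some c0 =>
    ((PySem.List.enumerate sentence.toList).foldl (pvStepA start_idx end_idx)
      ((c0.toNat : Int), ([] : List Int))).2

-- ===== PORT B =====
def find_earlist_char_idx_alt (sentence : String) (start_idx : Int) (end_idx : Int) : List Int :=
  match PySem.Str.pyGet? sentence start_idx with
  | none => []   -- sentence[start_idx] raises IndexError: outside Pre_
  | some m0 =>
    let lo : Int := max start_idx 0
    let hi : Int := min end_idx (PySem.Str.len sentence)
    let m : Char := (PySem.List.pyRange lo hi 1).foldl
      (fun m i => match PySem.Str.pyGet? sentence i with
        | some c => if c < m then c else m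
        | none => m) m0            -- none unreachable: lo ≤ i < hi ≤ len(sentence)
    (PySem.List.pyRange lo hi 1).filter (fun i => PySem.Str.pyGet? sentence i == some m)

-- ===== PRECONDITION & SPEC =====
-- Pre_ excludes exactly the inputs where A raises IndexError on its initial
-- sentence[start_idx] access (start_idx outside [-len, len)).
def Pre_find_earlist_char_idx (sentence : String) (start_idx : Int) (end_idx : Int) : Prop :=
  -(PySem.Str.len sentence) ≤ start_idx ∧ start_idx < PySem.Str.len sentence

instance (sentence : String) (start_idx : Int) (end_idx : Int) : Decidable (Pre_find_earlist_char_idx sentence start_idx end_idx) := by unfold Pre_find_earlist_char_idx; infer_instance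

def pvWitness_find_earlist_char_idx : String × Int × Int := ("banana", 1, 5)

def Spec_find_earlist_char_idx (sentence : String) (start_idx : Int) (end_idx : Int) (out : List Int) : Prop := out = find_earlist_char_idx_alt sentence start_idx end_idx
instance (sentence : String) (start_idx : Int) (end_idx : Int) (out : List Int) : Decidable (Spec_find_earlist_char_idx sentence start_idx end_idx out) := by unfold Spec_find_earlist_char_idx; infer_instance

-- ===== CLAIM (what is proved, stated in full; the proofs are below) =====
def Claim_equal_find_earlist_char_idx : Prop := ∀ (sentence : String) (start_idx : Int) (end_idx : Int), Dom_find_earlist_char_idx sentence start_idx end_idx → Pre_find_earlist_char_idx sentence start_idx end_idx → Spec_find_earlist_char_idx sentence start_idx end_idx (find_earlist_char_idx sentence start_idx end_idx)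

-- ===== LEMMAS AND PROOFS =====
-- unguarded step of A's loop (what pvStepA does on an in-range pair)
def pvStepG (st : Int × List Int) (p : Int × Char) : Int × List Int :=
  if (p.2.toNat : Int) < st.1 then ((p.2.toNat : Int), [p.1])
  else if (p.2.toNat : Int) = st.1 then (st.1, st.2 ++ [p.1])
  else st

def pvMinF (m : Int) (c : Char) : Int := min m (c.toNat : Int)

lemma pvfold_skip (a b : Int) (ps : List (Int × Char)) (st : Int × List Int)
    (h : ∀ p ∈ ps, ¬(a ≤ p.1 ∧ p.1 < b)) :
    ps.foldl (pvStepA a b) st = st := by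
  induction ps generalizing st with
  | nil => rfl
  | cons q t ih =>
    have hq : pvStepA a b st q = st := by
      simp only [pvStepA, if_neg (h q (by simp))]
    rw [List.foldl_cons, hq]
    exact ih st (fun p hp => h p (by simp [hp]))

lemma pvfold_in (a b : Int) (ps : List (Int × Char)) (st : Int × List Int)
    (h : ∀ p ∈ ps, a ≤ p.1 ∧ p.1 < b) :
    ps.foldl (pvStepA a b) st = ps.foldl pvStepG st := by
  induction ps generalizing st with
  | nil => rfl
  | cons q t ih =>
    have hq : pvStepA a b st q = pvStepG st q := by
      simp only [pvStepA, pvStepG, if_pos (h q (by simp))]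
    rw [List.foldl_cons, List.foldl_cons, hq]
    exact ih _ (fun p hp => h p (by simp [hp]))

lemma pvfoldl_min_le (cs : List Char) (m0 : Int) : cs.foldl pvMinF m0 ≤ m0 := by
  induction cs generalizing m0 with
  | nil => simp
  | cons c t ih => exact le_trans (ih _) (min_le_left _ _)

lemma pvfoldG_char (cs : List Char) (k m0 : Int) (acc : List Int) :
    (PySem.List.enumerate cs k).foldl pvStepG (m0, acc)
      = (cs.foldl pvMinF m0,
         (if cs.foldl pvMinF m0 = m0 then acc else []) ++
           ((PySem.List.enumerate cs k).filter
             (fun p => decide ((p.2.toNat : Int) = cs.foldl pvMinF m0))).map (·.1)) := by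
  induction cs generalizing k m0 acc with
  | nil => simp [PySem.List.enumerate_nil]
  | cons c t ih =>
    rw [PySem.List.enumerate_cons]
    simp only [List.foldl_cons, List.filter_cons]
    rcases lt_trichotomy ((c.toNat : Int)) m0 with hlt | heq | hgt
    · have hstep : pvStepG (m0, acc) (k, c) = ((c.toNat : Int), [k]) := by
        simp [pvStepG, hlt]
      have hmin : pvMinF m0 c = (c.toNat : Int) := by
        unfold pvMinF; rw [min_eq_right (le_of_lt hlt)]
      have hle := pvfoldl_min_le t ((c.toNat : Int))
      rw [hstep]; simp only [hmin]; rw [ih (k + 1) ((c.toNat : Int)) [k]]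
      by_cases hd : t.foldl pvMinF ((c.toNat : Int)) = (c.toNat : Int)
      · simp [hd, if_neg (by omega : ¬ ((c.toNat : Int) = m0))]
      · simp [hd, if_neg (fun h : (c.toNat : Int) = t.foldl pvMinF ((c.toNat : Int)) => hd h.symm), if_neg (by omega : ¬ (t.foldl pvMinF ((c.toNat : Int)) = m0))]
    · have hstep : pvStepG (m0, acc) (k, c) = (m0, acc ++ [k]) := by
        simp [pvStepG, heq]
      have hmin : pvMinF m0 c = m0 := by
        unfold pvMinF; rw [heq, min_self]
      rw [hstep]; simp only [hmin]; rw [ih (k + 1) m0 (acc ++ [k])]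
      by_cases hm : t.foldl pvMinF m0 = m0
      · simp [hm, heq, List.append_assoc]
      · have hne : ¬((c.toNat : Int) = t.foldl pvMinF m0) := fun h => hm (heq ▸ h).symm
        simp [hm, hne]
    · have hstep : pvStepG (m0, acc) (k, c) = (m0, acc) := by
        simp [pvStepG, not_lt_of_gt hgt, (ne_of_gt hgt)]
      have hmin : pvMinF m0 c = m0 := by
        unfold pvMinF; rw [min_eq_left (le_of_lt hgt)]
      have hle := pvfoldl_min_le t m0
      rw [hstep]; simp only [hmin]; rw [ih (k + 1) m0 acc]
      simp [if_neg (by omega : ¬ ((c.toNat : Int) = t.foldl pvMinF m0))]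

lemma pvcode_min (c x : Char) : ((min c x).toNat : Int) = min ((c.toNat : Int)) ((x.toNat : Int)) := by
  rcases le_total c x with h | h
  · rw [min_eq_left h, min_eq_left]; exact_mod_cast Int.ofNat_le.mpr (Fin.mk_le_mk.mp h)
  · rw [min_eq_right h, min_eq_right]; exact_mod_cast Int.ofNat_le.mpr (Fin.mk_le_mk.mp h)

lemma pvcode_foldl (t : List Char) (c : Char) :
    (((t.foldl min c).toNat : Int)) = t.foldl pvMinF ((c.toNat : Int)) := by
  induction t generalizing c with
  | nil => rfl
  | cons x t ih =>
    rw [List.foldl_cons, List.foldl_cons, ih (min c x), pvcode_min]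
    rfl


lemma pvpred (x m : Char) : decide ((x.toNat : Int) = (m.toNat : Int)) = (some x == some m) := by
  by_cases h : x = m
  · simp [h]
  · have hne : x.toNat ≠ m.toNat := fun hc => h (Char.ext (UInt32.toNat_inj.mp (by exact_mod_cast hc)))
    simp [h, hne]

lemma pvminif (m c : Char) : (if c < m then c else m) = min m c := by
  by_cases h : c < m
  · rw [if_pos h, min_eq_right h.le]
  · rw [if_neg h, min_eq_left (le_of_not_gt h)]

lemma pvcore (l : List Char) (a b : Int) (m0c : Char) :
    (List.foldl (pvStepA a b) (((m0c.toNat : Int)), ([] : List Int)) (PySem.List.enumerate l)).2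
      = (PySem.List.pyRange (max a 0) (min b ((l.length : Int))) 1).filter
          (fun i => PySem.List.pyGet? l i ==
            some ((PySem.List.pyRange (max a 0) (min b ((l.length : Int))) 1).foldl
              (fun m i => match PySem.List.pyGet? l i with
                | some c => if c < m then c else m
                | none => m) m0c)) := by
  set lo : Int := max a 0 with hlodef
  set hi : Int := min b (l.length : Int) with hhidef
  have hchmin : hi = b ∨ hi = (l.length : Int) := min_choice _ _
  have hchmax : lo = a ∨ lo = 0 := max_choice _ _
  have hlo0 : (0:Int) ≤ lo := le_max_right _ _
  have ha_le_lo : a ≤ lo := le_max_left _ _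
  have hhi_le_b : hi ≤ b := min_le_left _ _
  have hhi_le_n : hi ≤ (l.length : Int) := min_le_right _ _
  by_cases hlh : hi ≤ lo
  · rw [pvfold_skip a b _ _ (by
      intro p hp
      rcases (PySem.List.mem_enumerate_iff _ _ _).mp hp with ⟨k, hk, rfl⟩
      omega)]
    rw [PySem.List.pyRange_one_eq_nil hlh]
    rfl
  · rw [not_le] at hlh
    have h0hi : (0:Int) ≤ hi := by omega
    have hLO : ((lo.toNat : Int)) = lo := Int.toNat_of_nonneg hlo0
    have hHI : ((hi.toNat : Int)) = hi := Int.toNat_of_nonneg h0hi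
    have hlt' : lo.toNat < hi.toNat := by omega
    have hn' : hi.toNat ≤ l.length := by omega
    have hseglen : ((l.drop lo.toNat).take (hi.toNat - lo.toNat)).length = hi.toNat - lo.toNat := by
      simp; omega
    have hprelen : (l.take lo.toNat).length = lo.toNat := by simp; omega
    have hsplit : l = l.take lo.toNat ++ (((l.drop lo.toNat).take (hi.toNat - lo.toNat)) ++ l.drop hi.toNat) := by
      conv_lhs => rw [← List.take_append_drop lo.toNat l]
      congr 1
      conv_lhs => rw [← List.take_append_drop (hi.toNat - lo.toNat) (l.drop lo.toNat)]
      congr 1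
      rw [List.drop_drop]
      congr 1
      omega
    conv_lhs => rw [hsplit]
    rw [PySem.List.enumerate_append, PySem.List.enumerate_append, List.foldl_append, List.foldl_append]
    rw [hprelen, hseglen]
    rw [pvfold_skip a b (PySem.List.enumerate (l.take lo.toNat) 0) _ (by
      intro p hp
      rcases (PySem.List.mem_enumerate_iff _ _ _).mp hp with ⟨k, hk, rfl⟩
      rw [hprelen] at hk
      omega)]
    rw [pvfold_skip a b (PySem.List.enumerate (l.drop hi.toNat) ((0:Int) + (lo.toNat : Int) + ((hi.toNat - lo.toNat : Nat) : Int))) _ (by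
      intro p hp
      rcases (PySem.List.mem_enumerate_iff _ _ _).mp hp with ⟨k, hk, rfl⟩
      simp only [List.length_drop] at hk
      omega)]
    rw [pvfold_in a b (PySem.List.enumerate ((l.drop lo.toNat).take (hi.toNat - lo.toNat)) ((0:Int) + (lo.toNat : Int))) _ (by
      intro p hp
      rcases (PySem.List.mem_enumerate_iff _ _ _).mp hp with ⟨k, hk, rfl⟩
      rw [hseglen] at hk
      omega)]
    rw [pvfoldG_char ((l.drop lo.toNat).take (hi.toNat - lo.toNat)) ((0:Int) + (lo.toNat : Int))]
    simp only [ite_self, List.nil_append]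
    have hrange : PySem.List.pyRange lo hi 1
        = ((PySem.List.enumerate ((l.drop lo.toNat).take (hi.toNat - lo.toNat)) ((0:Int) + (lo.toNat : Int))).map (·.1)) := by
      rw [PySem.List.map_fst_enumerate, hseglen]
      congr 1
      · omega
      · omega
    have hBfold : (PySem.List.pyRange lo hi 1).foldl
        (fun m i => match PySem.List.pyGet? l i with
          | some c => if c < m then c else m
          | none => m) m0c
        = ((l.drop lo.toNat).take (hi.toNat - lo.toNat)).foldl min m0c := by
      rw [hrange, List.foldl_map]
      rw [PySem.List.foldl_congr_mem _ _ (fun (m : Char) (p : Int × Char) => min m p.2) _ (by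
        intro acc p hp
        rcases (PySem.List.mem_enumerate_iff _ _ _).mp hp with ⟨k, hk, rfl⟩
        have hk' : k < hi.toNat - lo.toNat := by rw [hseglen] at hk; omega
        have hkl : lo.toNat + k < l.length := by omega
        have hsegk : ((l.drop lo.toNat).take (hi.toNat - lo.toNat))[k]'hk = l[lo.toNat + k]'hkl := by
          rw [List.getElem_take, List.getElem_drop]
        have hidx : PySem.List.pyGet? l ((0:Int) + (lo.toNat : Int) + (k : Int)) = some (l[lo.toNat + k]'hkl) := by
          rw [PySem.List.pyGet?_of_nonneg _ (by omega)]
          rw [show (((0:Int) + (lo.toNat : Int) + (k : Int))).toNat = lo.toNat + k from by omega]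
          exact List.getElem?_eq_getElem hkl
        dsimp only
        rw [hidx]
        simp only [hsegk]
        exact pvminif acc _)]
      have hmap : List.foldl (fun (m : Char) (p : Int × Char) => min m p.2) m0c
            (PySem.List.enumerate ((l.drop lo.toNat).take (hi.toNat - lo.toNat)) ((0:Int) + (lo.toNat : Int)))
          = List.foldl min m0c
            ((PySem.List.enumerate ((l.drop lo.toNat).take (hi.toNat - lo.toNat)) ((0:Int) + (lo.toNat : Int))).map (·.2)) :=
        (List.foldl_map).symm
      rw [hmap, PySem.List.map_snd_enumerate]
    rw [hBfold]
    rw [← pvcode_foldl]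
    rw [hrange, List.filter_map]
    congr 1
    apply List.filter_congr
    intro p hp
    rcases (PySem.List.mem_enumerate_iff _ _ _).mp hp with ⟨k, hk, rfl⟩
    have hk' : k < hi.toNat - lo.toNat := by rw [hseglen] at hk; omega
    have hkl : lo.toNat + k < l.length := by omega
    have hsegk : ((l.drop lo.toNat).take (hi.toNat - lo.toNat))[k]'hk = l[lo.toNat + k]'hkl := by
      rw [List.getElem_take, List.getElem_drop]
    have hidx : PySem.List.pyGet? l ((0:Int) + (lo.toNat : Int) + (k : Int)) = some (l[lo.toNat + k]'hkl) := by
      rw [PySem.List.pyGet?_of_nonneg _ (by omega)]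
      rw [show (((0:Int) + (lo.toNat : Int) + (k : Int))).toNat = lo.toNat + k from by omega]
      exact List.getElem?_eq_getElem hkl
    simp only [Function.comp]
    rw [hidx]
    simp only [hsegk]
    exact pvpred _ _

lemma pvmain : ∀ (sentence : String) (start_idx : Int) (end_idx : Int),
    Pre_find_earlist_char_idx sentence start_idx end_idx →
    find_earlist_char_idx sentence start_idx end_idx
      = find_earlist_char_idx_alt sentence start_idx end_idx := by
  intro s a b hpre
  obtain ⟨ha1, ha2⟩ := hpre
  have hlen : PySem.Str.len s = (s.toList.length : Int) := by simp [pysem]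
  rw [hlen] at ha1 ha2
  cases hg : PySem.List.pyGet? s.toList a with
  | none =>
    exact absurd ((PySem.List.pyGet?_eq_none_iff _ _).mp hg)
      (not_not_intro (show PySem.Raise.InRange s.toList.length a by
        simp only [PySem.Raise.InRange]
        omega))
  | some m0c =>
    have hget : PySem.Str.pyGet? s a = some m0c := by
      rw [PySem.Str.pyGet?_eq, PySem.Chars.pyGet?_eq_listPyGet?]
      exact hg
    unfold find_earlist_char_idx find_earlist_char_idx_alt
    rw [hget, hlen]
    dsimp only
    simp only [PySem.Str.pyGet?_eq, PySem.Chars.pyGet?_eq_listPyGet?]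
    exact pvcore s.toList a b m0c

-- ===== VERDICT (by name: the statement is the Claim_ definition above) =====
theorem find_earlist_char_idx_spec : Claim_equal_find_earlist_char_idx := by
  intro sentence start_idx end_idx _ hpre
  unfold Spec_find_earlist_char_idx
  exact pvmain sentence start_idx end_idx hpre
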